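-- pv_equiv track=rewrite | github.com/ProjectMI/MBCdecompiler | mbcdisasm/string_inference.py | _split_identifier_subtokens
-- ===== SOURCE A (Python) =====
-- from typing import Dict, Iterable, Iterator, List, Optional, Sequence, Tuple
--
-- def _split_identifier_subtokens(token: str) -> List[Tuple[int, str]]:
--     parts: List[Tuple[int, str]] = []
--     start = 0
--     for index in range(1, len(token)):
--         if token[index].isupper() and token[index - 1].islower():
--             if index - start >= 3:
--                 parts.append((start, token[start:index]))
--             start = index
--     if len(token) - start >= 3:
--         parts.append((start, token[start:]))
--     return parts
-- ===== SOURCE B (Python) =====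
-- def _split_identifier_subtokens(token):
--     n = len(token)
--
--     def next_cut(start):
--         for i in range(start + 1, n):
--             if token[i].isupper() and token[i - 1].islower():
--                 return i
--         return n
--
--     def emit(start):
--         end = next_cut(start)
--         head = [(start, token[start:end])] if end - start >= 3 else []
--         return head + emit(end) if end < n else head
--
--     return emit(0)
-- ===== Notes on version B (the rewrite author's own statement) =====
-- stated objective: alternative
-- what changed: B replaces A's single stateful accumulator loop by a recursive segment emitter: a helper searches for the next camelCase cut after the current start, and the recursion emits one segment per call and concatenates the rest, so there is no running parts/start state at all.
import Mathlib
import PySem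

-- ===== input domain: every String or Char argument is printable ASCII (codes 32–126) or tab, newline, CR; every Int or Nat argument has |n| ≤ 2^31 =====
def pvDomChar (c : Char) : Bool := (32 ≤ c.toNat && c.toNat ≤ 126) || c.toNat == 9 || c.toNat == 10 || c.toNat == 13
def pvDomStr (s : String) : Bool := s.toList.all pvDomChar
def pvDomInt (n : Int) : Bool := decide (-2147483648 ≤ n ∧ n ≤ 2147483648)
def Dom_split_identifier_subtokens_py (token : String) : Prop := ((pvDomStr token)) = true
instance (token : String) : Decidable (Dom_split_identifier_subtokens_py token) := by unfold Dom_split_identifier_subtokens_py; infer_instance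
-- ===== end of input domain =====

-- B replaces A's stateful accumulator loop by a recursive segment emitter (find next cut, emit, recurse); same cost, same results.

-- the camelCase test 'token[i].isupper() and token[i-1].islower()' (both Pythons contain this exact test)
def pvBoundary (l : List Char) (i : Int) : Bool :=
  match PySem.List.pyGet? l i, PySem.List.pyGet? l (i - 1) with
  | some c, some d => PySem.Chars.isupper c && PySem.Chars.islower d
  | _, _ => false

-- ===== PORT A =====
def split_identifier_subtokens_py (token : String) : List (Int × String) :=
  let l := token.toList
  let st :=
    (PySem.List.pyRange 1 (PySem.Str.len token) 1).foldl
      (fun (s : List (Int × String) × Int) i =>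
        if pvBoundary l i then
          (if 3 ≤ i - s.2 then
             s.1 ++ [(s.2, PySem.Str.slice token (some s.2) (some i))]
           else s.1, i)
        else s)
      ([], 0)
  if 3 ≤ PySem.Str.len token - st.2 then
    st.1 ++ [(st.2, PySem.Str.slice token (some st.2) none)]
  else st.1

-- ===== PORT B =====
-- B's next_cut: a for-loop with early return = first index in range(start+1, n) satisfying the test, else n
def pvNextCut (l : List Char) (n start : Int) : Int :=
  ((PySem.List.pyRange (start + 1) n 1).find? (pvBoundary l)).getD n

theorem pvNextCut_gt (l : List Char) (n start : Int) (h : pvNextCut l n start < n) :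
    start < pvNextCut l n start := by
  unfold pvNextCut at *
  cases hf : (PySem.List.pyRange (start + 1) n 1).find? (pvBoundary l) with
  | none => rw [hf] at h; simp at h
  | some b =>
      have hb := PySem.List.mem_pyRange_one.mp (List.mem_of_find?_eq_some hf)
      simp only [Option.getD_some]
      omega

-- B's emit: emit one segment per call, concatenate the rest
def pvEmit (token : String) (n start : Int) : List (Int × String) :=
  let e := pvNextCut token.toList n start
  let head :=
    if 3 ≤ e - start then [(start, PySem.Str.slice token (some start) (some e))] else []
  if h : e < n then head ++ pvEmit token n e else head
termination_by (n - start).toNat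
decreasing_by
  have := pvNextCut_gt token.toList n start h
  omega

def split_identifier_subtokens_py_alt (token : String) : List (Int × String) :=
  pvEmit token (PySem.Str.len token) 0

-- ===== PRECONDITION & SPEC =====
def Spec_split_identifier_subtokens_py (token : String) (out : List (Int × String)) : Prop := out = split_identifier_subtokens_py_alt token
instance (token : String) (out : List (Int × String)) : Decidable (Spec_split_identifier_subtokens_py token out) := by unfold Spec_split_identifier_subtokens_py; infer_instance

-- ===== CLAIM (what is proved, stated in full; the proofs are below) =====
def Claim_equal_split_identifier_subtokens_py : Prop := ∀ (token : String), Dom_split_identifier_subtokens_py token → Spec_split_identifier_subtokens_py token (split_identifier_subtokens_py token)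

-- ===== LEMMAS AND PROOFS =====

-- segments between consecutive cuts, with the shared '>= 3' guard
def pvSegs (token : String) : List Int → List (Int × String)
  | a :: b :: rest =>
      (if 3 ≤ b - a then [(a, PySem.Str.slice token (some a) (some b))] else [])
        ++ pvSegs token (b :: rest)
  | _ => []

-- A's fold over any index list computes the segments of (start :: filtered boundaries)
theorem pvFold_eq (token : String) (R : List Int) :
    ∀ (parts : List (Int × String)) (start : Int),
      R.foldl
        (fun (s : List (Int × String) × Int) i =>
          if pvBoundary token.toList i then
            (if 3 ≤ i - s.2 then
               s.1 ++ [(s.2, PySem.Str.slice token (some s.2) (some i))]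
             else s.1, i)
          else s)
        (parts, start)
      = (parts ++ pvSegs token (start :: R.filter (pvBoundary token.toList)),
         (R.filter (pvBoundary token.toList)).getLastD start) := by
  induction R with
  | nil => intro parts start; simp [pvSegs]
  | cons i R ih =>
      intro parts start
      simp only [List.foldl_cons]
      by_cases h : pvBoundary token.toList i = true
      · rw [if_pos h, ih, List.filter_cons_of_pos h]
        simp only [Prod.mk.injEq]
        constructor
        · simp only [pvSegs]
          split <;> simp
        · rw [List.getLastD_cons]
      · rw [if_neg h, ih, List.filter_cons_of_neg (by simpa using h)]

-- appending the final sentinel cut adds the trailing segment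
theorem pvSegs_append_last (token : String) (n : Int) :
    ∀ (cs : List Int) (a : Int),
      pvSegs token (a :: cs ++ [n])
        = pvSegs token (a :: cs)
          ++ (if 3 ≤ n - cs.getLastD a then
                [(cs.getLastD a, PySem.Str.slice token (some (cs.getLastD a)) (some n))]
              else []) := by
  intro cs
  induction cs with
  | nil => intro a; simp [pvSegs]
  | cons b cs ih =>
      intro a
      simp only [List.cons_append] at ih ⊢
      simp only [pvSegs]
      rw [List.getLastD_cons, ih b, List.append_assoc]

theorem pvGetLastD_mem_or (l : List Int) (d : Int) :
    l.getLastD d = d ∨ l.getLastD d ∈ l := by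
  induction l generalizing d with
  | nil => left; rfl
  | cons a l ih =>
      rw [List.getLastD_cons]
      rcases ih a with h | h
      · right; rw [h]; exact List.mem_cons_self
      · right; exact List.mem_cons_of_mem _ h

-- a nonnegative-start open slice equals the slice up to the length
theorem pvSlice_none_eq (token : String) (a : Int) (ha : 0 ≤ a) :
    PySem.Str.slice token (some a) none
      = PySem.Str.slice token (some a) (some (PySem.Str.len token)) := by
  have h1 : PySem.List.slice token.toList (some a) none
      = PySem.List.slice token.toList (some a) (some (token.toList.length : Int)) := by
    rw [PySem.List.slice_from _ ha, PySem.List.slice_toNat _ ha (by positivity)]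
    rw [Int.toNat_natCast, List.take_of_length_le (by simp)]
  simp [PySem.Str.slice, PySem.Chars.slice_eq_listSlice, PySem.Str.len_eq, h1]

-- A equals the segments of the full cut sequence 0 :: boundaries ++ [n]
theorem pvA_eq (token : String) :
    split_identifier_subtokens_py token
      = pvSegs token
          (0 :: (PySem.List.pyRange 1 (PySem.Str.len token) 1).filter (pvBoundary token.toList)
             ++ [PySem.Str.len token]) := by
  unfold split_identifier_subtokens_py
  simp only [pvFold_eq token _ [] 0, List.nil_append]
  rw [pvSegs_append_last]
  have hlast : 0 ≤ ((PySem.List.pyRange 1 (PySem.Str.len token) 1).filter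
      (pvBoundary token.toList)).getLastD 0 := by
    rcases pvGetLastD_mem_or ((PySem.List.pyRange 1 (PySem.Str.len token) 1).filter
      (pvBoundary token.toList)) 0 with h | h
    · omega
    · have := (PySem.List.mem_pyRange_one (a := 1) (b := PySem.Str.len token)).mp
        (List.mem_of_mem_filter h)
      omega
  rw [pvSlice_none_eq token _ hlast]
  split <;> simp

-- B's emitter equals the segments of start :: boundaries-after-start ++ [n]
theorem pvEmit_eq (token : String) (n : Int) :
    ∀ (k : Nat) (start : Int), (n - start).toNat ≤ k →
      pvEmit token n start
        = pvSegs token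
            (start :: (PySem.List.pyRange (start + 1) n 1).filter (pvBoundary token.toList)
               ++ [n]) := by
  intro k
  induction k with
  | zero =>
      intro start hk
      have hn : n ≤ start := by omega
      rw [pvEmit]
      have hr : PySem.List.pyRange (start + 1) n 1 = [] :=
        PySem.List.pyRange_one_eq_nil (by omega)
      have he : pvNextCut token.toList n start = n := by
        unfold pvNextCut; rw [hr]; rfl
      simp only [he, hr]
      rw [dif_neg (by omega)]
      simp [pvSegs]
  | succ k ih =>
      intro start hk
      rw [pvEmit]
      cases hf : (PySem.List.pyRange (start + 1) n 1).find? (pvBoundary token.toList) with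
      | none =>
          have he : pvNextCut token.toList n start = n := by
            unfold pvNextCut; rw [hf]; rfl
          have hfil : (PySem.List.pyRange (start + 1) n 1).filter (pvBoundary token.toList) = [] :=
            List.filter_eq_nil_iff.mpr (by
              intro a ha
              simpa using List.find?_eq_none.mp hf a ha)
          simp only [he, hfil]
          rw [dif_neg (by omega)]
          simp [pvSegs]
      | some b =>
          have he : pvNextCut token.toList n start = b := by
            unfold pvNextCut; rw [hf]; rfl
          have hb := PySem.List.mem_pyRange_one.mp (List.mem_of_find?_eq_some hf)
          have hpb : pvBoundary token.toList b = true := List.find?_some hf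
          -- split the range at b and kill the prefix under the filter
          have hsplit : PySem.List.pyRange (start + 1) n 1
              = PySem.List.pyRange (start + 1) b 1 ++ PySem.List.pyRange b n 1 :=
            PySem.List.pyRange_one_append _ _ _ (by omega) (by omega)
          have hcons : PySem.List.pyRange b n 1 = b :: PySem.List.pyRange (b + 1) n 1 :=
            PySem.List.pyRange_one_cons (by omega)
          have hpre : (PySem.List.pyRange (start + 1) b 1).find? (pvBoundary token.toList)
              = none := by
            cases hg : (PySem.List.pyRange (start + 1) b 1).find? (pvBoundary token.toList) with
            | none => rfl
            | some c =>
                have hc := PySem.List.mem_pyRange_one.mp (List.mem_of_find?_eq_some hg)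
                rw [hsplit, List.find?_append, hg] at hf
                simp [Option.orElse] at hf
                omega
          have hfil : (PySem.List.pyRange (start + 1) n 1).filter (pvBoundary token.toList)
              = b :: (PySem.List.pyRange (b + 1) n 1).filter (pvBoundary token.toList) := by
            rw [hsplit, List.filter_append,
              List.filter_eq_nil_iff.mpr (by
                intro a ha
                simpa using List.find?_eq_none.mp hpre a ha),
              hcons, List.filter_cons_of_pos hpb, List.nil_append]
          simp only [he, hfil]
          rw [dif_pos hb.2, ih b (by omega)]
          simp only [List.cons_append, pvSegs]

-- ===== VERDICT (by name: the statement is the Claim_ definition above) =====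
theorem split_identifier_subtokens_py_spec : Claim_equal_split_identifier_subtokens_py := by
  intro token _
  unfold Spec_split_identifier_subtokens_py split_identifier_subtokens_py_alt
  rw [pvA_eq, pvEmit_eq token (PySem.Str.len token) (PySem.Str.len token - 0).toNat 0 le_rfl]
  norm_num
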